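-- pv_equiv track=rewrite | github.com/Shree4226/Automation-scripts | refactorable.py | isRefactorableNumber
-- ===== SOURCE A (Python) =====
-- import math
--
-- def isRefactorableNumber(n):
--
-- 	# Initialize result
-- 	divCount = 0
--
-- 	for i in range(1,int(math.sqrt(n))+1):
--
-- 		if n % i == 0:
--
-- 			# If divisors are equal, count only one
-- 			if n/i == i:
-- 				divCount += 1
--
-- 			else: # Otherwise count both
-- 				divCount += 2
--
-- 	return n % divCount == 0
-- ===== SOURCE B (Python) =====
-- def isRefactorableNumber(n):
--     # Divisor count via prime factorisation: tau(n) = prod over primes of (exponent + 1).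
--     divCount = 1
--     m = n
--     d = 2
--     while d * d <= m:
--         if m % d == 0:
--             e = 0
--             while m % d == 0:
--                 m //= d
--                 e += 1
--             divCount *= e + 1
--         d += 1
--     if m > 1:
--         divCount *= 2
--     return n % divCount == 0
-- ===== Notes on version B (the rewrite author's own statement) =====
-- stated objective: alternative
-- what changed: B computes the divisor count from the prime factorisation (trial division, tau(n) = product of exponent+1) instead of A's sqrt-bounded loop that pairs each small divisor i with n/i.
import Mathlib
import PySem

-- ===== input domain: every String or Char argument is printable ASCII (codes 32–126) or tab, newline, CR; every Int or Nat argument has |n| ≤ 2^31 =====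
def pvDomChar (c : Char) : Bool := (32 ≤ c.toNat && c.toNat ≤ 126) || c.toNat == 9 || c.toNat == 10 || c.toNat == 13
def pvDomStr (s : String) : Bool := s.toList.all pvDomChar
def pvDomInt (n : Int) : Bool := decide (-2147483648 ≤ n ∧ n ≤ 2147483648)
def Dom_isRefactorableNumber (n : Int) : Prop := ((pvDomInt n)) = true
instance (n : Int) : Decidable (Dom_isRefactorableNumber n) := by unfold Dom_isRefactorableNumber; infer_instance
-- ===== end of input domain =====

-- B counts divisors through the prime factorisation (tau(n) = prod of exponent+1) instead of
-- A's sqrt-bounded loop that pairs each small divisor i with n/i.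

-- ===== PORT A =====
-- int(math.sqrt(n)) is ported as Nat.sqrt: exact on the admitted domain 0 ≤ n ≤ 2^31
-- (double sqrt is correctly rounded and floor-exact there); for n < 0 math.sqrt raises
-- ValueError, excluded by Pre_.  Python's float test `n/i == i` is evaluated under
-- `n % i == 0`, where n/i is integer-valued and exact for |n| ≤ 2^31, so it is ported
-- as floor division.
def isRefactorableNumber (n : Int) : Bool :=
  let s : Int := (Nat.sqrt n.toNat : Int)
  let divCount : Int :=
    (PySem.List.pyRange 1 (s + 1) 1).foldl
      (fun acc i =>
        if PySem.Int.mod n i = 0 then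
          if PySem.Int.floordiv n i = i then acc + 1 else acc + 2
        else acc) 0
  decide (PySem.Int.mod n divCount = 0)

-- ===== PORT B =====
-- inner `while m % d == 0: m //= d; e += 1`; the fuel argument only makes the recursion
-- structural (the fuel passed below never runs out where the Python loop runs).
def pvTrialInner : Nat → Int → Int → Int → Int × Int
  | 0, _, m, e => (e, m)
  | fuel + 1, d, m, e =>
    if PySem.Int.mod m d = 0 then
      pvTrialInner fuel d (PySem.Int.floordiv m d) (e + 1)
    else (e, m)

-- outer `while d * d <= m:` plus the trailing `if m > 1: divCount *= 2`; fuel as above.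
def pvTrialDiv : Nat → Int → Int → Int → Int
  | 0, _, m, divCount => if 1 < m then divCount * 2 else divCount
  | fuel + 1, d, m, divCount =>
    if d * d ≤ m then
      if PySem.Int.mod m d = 0 then
        let p := pvTrialInner m.toNat d m 0
        pvTrialDiv fuel (d + 1) p.2 (divCount * (p.1 + 1))
      else pvTrialDiv fuel (d + 1) m divCount
    else if 1 < m then divCount * 2 else divCount

def isRefactorableNumber_alt (n : Int) : Bool :=
  let divCount : Int := pvTrialDiv n.toNat 2 n 1
  decide (PySem.Int.mod n divCount = 0)

-- ===== PRECONDITION & SPEC =====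
-- Pre_ excludes exactly n ≤ 0: A raises there (ValueError from math.sqrt for n < 0,
-- ZeroDivisionError on n = 0 where divCount stays 0).
def Pre_isRefactorableNumber (n : Int) : Prop := 1 ≤ n
instance (n : Int) : Decidable (Pre_isRefactorableNumber n) := by unfold Pre_isRefactorableNumber; infer_instance
def pvWitness_isRefactorableNumber : Int := 12

def Spec_isRefactorableNumber (n : Int) (out : Bool) : Prop := out = isRefactorableNumber_alt n
instance (n : Int) (out : Bool) : Decidable (Spec_isRefactorableNumber n out) := by unfold Spec_isRefactorableNumber; infer_instance

-- ===== CLAIM (what is proved, stated in full; the proofs are below) =====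
def Claim_equal_isRefactorableNumber : Prop := ∀ (n : Int), Dom_isRefactorableNumber n → Pre_isRefactorableNumber n → Spec_isRefactorableNumber n (isRefactorableNumber n)

-- ===== LEMMAS AND PROOFS =====

-- list sum over a range as a Finset sum
lemma sum_map_range_int (t : ℕ) (f : ℕ → ℤ) :
    ((List.range t).map f).sum = ∑ i ∈ Finset.range t, f i := by
  induction t with
  | zero => simp
  | succ k ih => rw [List.range_succ, Finset.sum_range_succ]; simp [ih]

-- A's divisor-pairing count up to √m is the number of divisors of m (the heart of A = B).
lemma divcount_sqrt_eq_card (m : ℕ) (hm : 1 ≤ m) :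
    (∑ k ∈ Finset.range (Nat.sqrt m),
      if (k + 1) ∣ m then (if m / (k + 1) = k + 1 then 1 else 2) else 0)
    = m.divisors.card := by
  classical
  set s := Nat.sqrt m with hs
  have hL : (∑ k ∈ Finset.range s,
      if (k + 1) ∣ m then (if m / (k + 1) = k + 1 then 1 else 2) else 0)
      = ∑ d ∈ Finset.Icc 1 s, (if d ∣ m then (if m / d = d then 1 else 2) else 0) := by
    rw [← Finset.Ico_add_one_right_eq_Icc, Finset.sum_Ico_eq_sum_range]
    simp [Nat.add_comm 1]
  rw [hL, ← Finset.sum_filter]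
  set S := (Finset.Icc 1 s).filter (· ∣ m) with hS
  set Dall := (Finset.Icc 1 m).filter (· ∣ m) with hD
  have hsum : (∑ d ∈ S, (if m / d = d then 1 else 2))
      = S.card + (S.filter (fun d => ¬ m / d = d)).card := by
    calc (∑ d ∈ S, (if m / d = d then 1 else 2))
        = ∑ d ∈ S, (1 + if ¬ m / d = d then 1 else 0) :=
          Finset.sum_congr rfl (by intro d _; by_cases h : m / d = d <;> simp [h])
      _ = (∑ _d ∈ S, 1) + ∑ d ∈ S, (if ¬ m / d = d then 1 else 0) := Finset.sum_add_distrib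
      _ = S.card + (S.filter (fun d => ¬ m / d = d)).card := by
          simp [Finset.card_filter]
  rw [hsum]
  -- split the divisors of m at s
  have hsplit : (Dall.filter (fun d => d ≤ s)).card
      + (Dall.filter (fun d => ¬ d ≤ s)).card = Dall.card :=
    Finset.card_filter_add_card_filter_not _
  have hsmall : Dall.filter (fun d => d ≤ s) = S := by
    ext d
    simp only [hS, hD, Finset.mem_filter, Finset.mem_Icc]
    constructor
    · rintro ⟨⟨⟨h1, _⟩, hd⟩, hle⟩; exact ⟨⟨h1, hle⟩, hd⟩
    · rintro ⟨⟨h1, hle⟩, hd⟩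
      exact ⟨⟨⟨h1, Nat.le_of_dvd hm hd⟩, hd⟩, hle⟩
  have hbij : (Dall.filter (fun d => ¬ d ≤ s)).card
      = (S.filter (fun d => ¬ m / d = d)).card := by
    apply Finset.card_bij (fun d _ => m / d)
    · -- maps into target
      intro d hd
      simp only [hD, Finset.mem_filter, Finset.mem_Icc, not_le] at hd
      obtain ⟨⟨⟨h1, hle⟩, hdvd⟩, hgt⟩ := hd
      have hd0 : 0 < d := h1
      have hm0 : m ≠ 0 := by omega
      have hmul : m / d * d = m := Nat.div_mul_cancel hdvd
      have hq1 : 1 ≤ m / d := Nat.div_pos hle hd0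
      have hqs : m / d ≤ s := by
        by_contra hqgt
        rw [not_le] at hqgt
        have h1' : s + 1 ≤ m / d := hqgt
        have h2' : s + 1 ≤ d := hgt
        have hthis : (s + 1) * (s + 1) ≤ m / d * d := Nat.mul_le_mul h1' h2'
        rw [hmul] at hthis
        have hlt : m < (s + 1) * (s + 1) := by
          have h := Nat.lt_succ_sqrt' m
          simpa [hs, pow_two] using h
        omega
      have hdd : m / (m / d) = d := Nat.div_div_self hdvd hm0
      have hne : ¬ m / (m / d) = m / d := by
        rw [hdd]; omega
      simp only [hS, Finset.mem_filter, Finset.mem_Icc]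
      exact ⟨⟨⟨hq1, hqs⟩, Nat.div_dvd_of_dvd hdvd⟩, hne⟩
    · -- injective
      intro d1 h1 d2 h2 heq
      simp only [hD, Finset.mem_filter, Finset.mem_Icc, not_le] at h1 h2
      have hm0 : m ≠ 0 := by omega
      have e1 : m / (m / d1) = d1 := Nat.div_div_self h1.1.2 hm0
      have e2 : m / (m / d2) = d2 := Nat.div_div_self h2.1.2 hm0
      rw [← e1, ← e2, heq]
    · -- surjective
      intro e he
      simp only [hS, Finset.mem_filter, Finset.mem_Icc] at he
      obtain ⟨⟨⟨he1, hes⟩, hedvd⟩, hene⟩ := he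
      have hm0 : m ≠ 0 := by omega
      refine ⟨m / e, ?_, Nat.div_div_self hedvd hm0⟩
      simp only [hD, Finset.mem_filter, Finset.mem_Icc, not_le]
      have hmul : m / e * e = m := Nat.div_mul_cancel hedvd
      have hq1 : 1 ≤ m / e := Nat.div_pos (Nat.le_of_dvd hm hedvd) he1
      refine ⟨⟨⟨hq1, Nat.div_le_self m e⟩, Nat.div_dvd_of_dvd hedvd⟩, ?_⟩
      by_contra hle
      rw [not_lt] at hle
      have hss : s * s ≤ m := by
        have h := Nat.sqrt_le' m
        simpa [hs, pow_two] using h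
      have h1' : m / e * e ≤ s * e := Nat.mul_le_mul_right e hle
      have h2' : s * e ≤ s * s := Nat.mul_le_mul_left s hes
      rw [hmul] at h1'
      have hes' : e = s := by nlinarith
      have hqs' : m / e = s := by nlinarith
      exact hene (by rw [hqs', hes'])
  have hdiv : Dall = m.divisors := by
    rw [hD, ← Finset.Ico_add_one_right_eq_Icc]
    rfl
  have hsm := congrArg Finset.card hsmall
  have hcard := congrArg Finset.card hdiv
  omega

-- A's port: its divCount fold is the (cast) pairing sum over √m
lemma divCountA_eq (m : ℕ) :
    ((PySem.List.pyRange 1 ((Nat.sqrt m : ℤ) + 1) 1).foldl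
      (fun acc i =>
        if PySem.Int.mod (m : ℤ) i = 0 then
          if PySem.Int.floordiv (m : ℤ) i = i then acc + 1 else acc + 2
        else acc) 0)
    = ((∑ k ∈ Finset.range (Nat.sqrt m),
        if (k + 1) ∣ m then (if m / (k + 1) = k + 1 then 1 else 2) else 0 : ℕ) : ℤ) := by
  classical
  have hfun : (fun (acc i : ℤ) =>
      if PySem.Int.mod (m : ℤ) i = 0 then
        if PySem.Int.floordiv (m : ℤ) i = i then acc + 1 else acc + 2
      else acc)
      = fun acc i => acc +
        (if PySem.Int.mod (m : ℤ) i = 0 then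
          (if PySem.Int.floordiv (m : ℤ) i = i then 1 else 2) else 0) := by
    funext acc i; split_ifs <;> ring
  rw [hfun, PySem.List.foldl_add, PySem.List.pyRange_one]
  have ht : (((Nat.sqrt m : ℤ) + 1) - 1).toNat = Nat.sqrt m := by omega
  rw [ht, List.map_map, sum_map_range_int]
  push_cast
  rw [zero_add]
  apply Finset.sum_congr rfl
  intro k _
  have hcast : (1 : ℤ) + (k : ℤ) = ((k + 1 : ℕ) : ℤ) := by push_cast; ring
  simp only [Function.comp, hcast, PySem.Int.mod_natCast, PySem.Int.floordiv_natCast]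
  by_cases hd : (k + 1) ∣ m
  · have h0 : m % (k + 1) = 0 := Nat.dvd_iff_mod_eq_zero.mp hd
    simp only [hd, h0, if_pos, Nat.cast_zero]
    norm_cast
  · have h0 : m % (k + 1) ≠ 0 := fun h => hd (Nat.dvd_iff_mod_eq_zero.mpr h)
    rw [if_neg hd, if_neg (fun h => h0 (by exact_mod_cast h))]

-- B's inner loop divides out d completely: it returns (e + k, m') with m = d^k * m', d ∤ m'
lemma pvTrialInner_spec : ∀ (fuel m d : ℕ) (e : Int), 2 ≤ d → 1 ≤ m → m ≤ fuel →
    ∃ (k mq : ℕ), pvTrialInner fuel (d : ℤ) (m : ℤ) e = (e + (k : ℤ), (mq : ℤ))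
      ∧ 1 ≤ mq ∧ m = d ^ k * mq ∧ ¬ d ∣ mq := by
  intro fuel
  induction fuel with
  | zero => intro m d e _ hm hf; omega
  | succ fuel ih =>
    intro m d e hd hm hf
    by_cases hdvd : d ∣ m
    · have h0 : PySem.Int.mod (m : ℤ) (d : ℤ) = 0 := by
        rw [PySem.Int.mod_natCast, Nat.dvd_iff_mod_eq_zero.mp hdvd, Nat.cast_zero]
      have hmd1 : 1 ≤ m / d := Nat.div_pos (Nat.le_of_dvd hm hdvd) (by omega)
      have hlt : m / d < m := Nat.div_lt_self hm (by omega)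
      obtain ⟨k, mq, hrec, hmq1, hfact, hnd⟩ := ih (m / d) d (e + 1) hd hmd1 (by omega)
      refine ⟨k + 1, mq, ?_, hmq1, ?_, hnd⟩
      · rw [pvTrialInner, if_pos h0, PySem.Int.floordiv_natCast, hrec]
        simp only [Prod.mk.injEq]
        exact ⟨by push_cast; ring, by simp⟩
      · rw [pow_succ]
        calc m = d * (m / d) := (Nat.mul_div_cancel' hdvd).symm
          _ = d * (d ^ k * mq) := by rw [hfact]
          _ = d ^ k * d * mq := by ring
    · have h0 : PySem.Int.mod (m : ℤ) (d : ℤ) ≠ 0 := by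
        rw [PySem.Int.mod_natCast]
        exact_mod_cast fun h => hdvd (Nat.dvd_iff_mod_eq_zero.mpr (by exact_mod_cast h))
      refine ⟨0, m, ?_, hm, by simp, hdvd⟩
      rw [pvTrialInner, if_neg h0]
      simp

-- the trailing `if m > 1`: below d², what remains is 1 or a single prime
lemma pvTrialDiv_tail (d m : ℕ) (c : Int) (hm : 1 ≤ m) (hlt : m < d * d)
    (hfac : ∀ p : ℕ, p.Prime → p ∣ m → d ≤ p) :
    (if 1 < (m : ℤ) then c * 2 else c) = c * (m.divisors.card : ℤ) := by
  by_cases h1 : m = 1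
  · subst h1
    rw [if_neg (by norm_num), Nat.divisors_one]
    simp
  · have hm2 : 2 ≤ m := by omega
    have hq := Nat.minFac_prime (show m ≠ 1 from h1)
    have hqd : d ≤ m.minFac := hfac _ hq (Nat.minFac_dvd m)
    have hprime : m.Prime := by
      by_contra hnp
      have := Nat.minFac_sq_le_self (by omega) hnp
      rw [pow_two] at this
      have : d * d ≤ m := le_trans (Nat.mul_le_mul hqd hqd) this
      omega
    rw [if_pos (by exact_mod_cast hm2), hprime.divisors,
        Finset.card_insert_of_notMem (by simp [hprime.one_lt.ne]), Finset.card_singleton]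
    norm_num

-- B's outer loop: once every prime factor of m is ≥ d, it returns c * #divisors(m)
lemma pvTrialDiv_spec : ∀ (fuel d m : ℕ) (c : Int), 2 ≤ d → 1 ≤ m → m + 1 - d ≤ fuel →
    (∀ p : ℕ, p.Prime → p ∣ m → d ≤ p) →
    pvTrialDiv fuel (d : ℤ) (m : ℤ) c = c * (m.divisors.card : ℤ) := by
  intro fuel
  induction fuel with
  | zero =>
    intro d m c hd hm hN hfac
    have hlt : m < d * d := by nlinarith [show m < d by omega]
    exact pvTrialDiv_tail d m c hm hlt hfac
  | succ fuel ih =>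
    intro d m c hd hm hN hfac
    by_cases hg : d * d ≤ m
    · have hdm : d ≤ m := le_trans (by nlinarith) hg
      rw [pvTrialDiv, if_pos (by exact_mod_cast hg)]
      by_cases hdvd : d ∣ m
      · have h0 : PySem.Int.mod (m : ℤ) (d : ℤ) = 0 := by
          rw [PySem.Int.mod_natCast, Nat.dvd_iff_mod_eq_zero.mp hdvd, Nat.cast_zero]
        rw [if_pos h0]
        obtain ⟨k, mq, hrec, hmq1, hfact, hnd⟩ :=
          pvTrialInner_spec ((m : ℤ)).toNat m d 0 hd hm (by simp)
        -- d is prime: its least prime factor divides m, hence is ≥ d, but also ≤ d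
        have hdprime : d.Prime := by
          have hq := Nat.minFac_prime (show d ≠ 1 by omega)
          have h1 : d ≤ d.minFac := hfac _ hq ((Nat.minFac_dvd d).trans hdvd)
          have h2 : d.minFac ≤ d := Nat.minFac_le (by omega)
          rwa [show d.minFac = d by omega] at hq
        have hmqle : mq ≤ m := Nat.le_of_dvd hm ⟨d ^ k, by rw [hfact]; ring⟩
        have hfac' : ∀ p : ℕ, p.Prime → p ∣ mq → d + 1 ≤ p := by
          intro p hp hpdvd
          have hpm : p ∣ m := hpdvd.trans ⟨d ^ k, by rw [hfact]; ring⟩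
          have h1 := hfac p hp hpm
          rcases Nat.lt_or_ge d p with h | h
          · omega
          · exfalso
            have : p = d := by omega
            subst this
            exact hnd hpdvd
        have hrec2 := ih (d + 1) mq (c * ((k : ℤ) + 1)) (by omega) hmq1 (by omega) hfac'
        rw [hrec]
        simp only [zero_add]
        push_cast at hrec2 ⊢
        rw [hrec2]
        -- #divisors(d^k * mq) = (k+1) * #divisors(mq)
        have hcop : (d ^ k).Coprime mq :=
          Nat.Coprime.pow_left k ((Nat.Prime.coprime_iff_not_dvd hdprime).mpr hnd)
        have hcard : m.divisors.card = (k + 1) * mq.divisors.card := by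
          rw [hfact, Nat.Coprime.card_divisors_mul hcop, Nat.divisors_prime_pow hdprime]
          simp
        rw [hcard]
        push_cast
        ring
      · have h0 : PySem.Int.mod (m : ℤ) (d : ℤ) ≠ 0 := by
          rw [PySem.Int.mod_natCast]
          exact_mod_cast fun h => hdvd (Nat.dvd_iff_mod_eq_zero.mpr (by exact_mod_cast h))
        rw [if_neg h0]
        apply ih (d + 1) m c (by omega) hm (by omega)
        intro p hp hpdvd
        have h1 := hfac p hp hpdvd
        rcases Nat.lt_or_ge d p with h | h
        · omega
        · exfalso
          have : p = d := by omega
          subst this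
          exact hdvd hpdvd
    · rw [pvTrialDiv, if_neg (by exact_mod_cast hg)]
      exact pvTrialDiv_tail d m c hm (by omega) hfac

-- B's port: its divCount is the number of divisors of m
lemma divCountAlt_eq (m : ℕ) (hm : 1 ≤ m) :
    pvTrialDiv m 2 (m : ℤ) 1 = ((m.divisors.card : ℕ) : ℤ) := by
  have h := pvTrialDiv_spec m 2 m 1 (by omega) hm (by omega)
    (fun p hp _ => hp.two_le)
  rw [show ((2:ℕ) : ℤ) = 2 from rfl] at h
  rw [h, one_mul]

-- ===== VERDICT (by name: the statement is the Claim_ definition above) =====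
theorem isRefactorableNumber_spec : Claim_equal_isRefactorableNumber := by
  intro n _ hpre
  unfold Spec_isRefactorableNumber isRefactorableNumber isRefactorableNumber_alt
  have hm : (1 : ℤ) ≤ n := hpre
  obtain ⟨m, rfl⟩ : ∃ m : ℕ, n = (m : ℤ) := ⟨n.toNat, by omega⟩
  have hm1 : 1 ≤ m := by exact_mod_cast hm
  simp only [Int.toNat_natCast]
  simp only [divCountA_eq, divCountAlt_eq m hm1, divcount_sqrt_eq_card m hm1]
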